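-- pv_equiv track=rewrite | github.com/carlos-morales-ortega/Criptography | Cipher Algorithms/01. Hill Cipher/program.py | msg
-- ===== SOURCE A (Python) =====
-- letters={'A':0,'B':1,'C':2,'D':3,'E':4,'F':5,'G':6,'H':7,'I':8,'J':9,'K':10,
--         'L':11,'M':12,'N':13,'O':14,'P':15,'Q':16,'R':17,'S':18,'T':19,
--         'U':20,'V':21,'W':22,'X':23,'Y':24,'Z':25}
--
-- def msg(matrix): #This function convert the matrix of vector into letters
--                     # and save it as a string for output
--     message = ''
--     for vector in matrix:
--         for x in vector:
--             for key,value in letters.items():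
--                 if x==value:
--                     message+=key
--
--     return message
-- ===== SOURCE B (Python) =====
-- def msg(matrix):
--     return ''.join(chr(x + 65) for vector in matrix for x in vector if 0 <= x < 26)
-- ===== Notes on version B (the rewrite author's own statement) =====
-- stated objective: faster
-- what changed: Replaces the inner scan over the 26-entry letters dict by direct arithmetic chr(x+65) guarded by 0 <= x < 26, and builds the string with ''.join over a generator instead of repeated += in triply nested loops.
import Mathlib
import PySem

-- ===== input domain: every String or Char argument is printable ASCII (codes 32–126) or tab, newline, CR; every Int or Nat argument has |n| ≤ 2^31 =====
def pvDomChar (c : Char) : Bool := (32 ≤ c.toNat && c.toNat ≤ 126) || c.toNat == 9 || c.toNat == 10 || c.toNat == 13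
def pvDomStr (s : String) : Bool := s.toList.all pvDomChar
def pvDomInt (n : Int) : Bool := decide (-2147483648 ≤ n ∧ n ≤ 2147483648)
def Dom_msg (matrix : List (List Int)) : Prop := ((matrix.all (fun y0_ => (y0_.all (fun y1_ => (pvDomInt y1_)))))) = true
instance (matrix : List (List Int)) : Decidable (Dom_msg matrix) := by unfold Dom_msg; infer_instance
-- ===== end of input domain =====

-- B replaces the inner scan over the 26-entry letters dict by direct arithmetic chr(x+65)
-- guarded by 0 <= x < 26 and builds the string with ''.join (objective: faster, constant factor).
-- ===== PORT A =====
-- the module-level 'letters' dict, in insertion order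
def lettersDict : List (String × Int) := [("A",0),("B",1),("C",2),("D",3),("E",4),("F",5),("G",6),("H",7),("I",8),("J",9),("K",10),("L",11),("M",12),("N",13),("O",14),("P",15),("Q",16),("R",17),("S",18),("T",19),("U",20),("V",21),("W",22),("X",23),("Y",24),("Z",25)]

def msg (matrix : List (List Int)) : String :=
  matrix.foldl (fun message vector =>
    vector.foldl (fun message x =>
      lettersDict.foldl (fun message kv =>
        if x = kv.2 then message ++ kv.1 else message) message) message) ""

-- ===== PORT B =====
def msg_alt (matrix : List (List Int)) : String :=
  PySem.Str.join "" (matrix.flatMap (fun vector =>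
    vector.filterMap (fun x =>
      if 0 ≤ x ∧ x < 26 then some (String.mk [Char.ofNat (x.toNat + 65)]) else none)))

-- ===== PRECONDITION & SPEC =====
def Spec_msg (matrix : List (List Int)) (out : String) : Prop := out = msg_alt matrix
instance (matrix : List (List Int)) (out : String) : Decidable (Spec_msg matrix out) := by unfold Spec_msg; infer_instance

-- ===== CLAIM (what is proved, stated in full; the proofs are below) =====
def Claim_equal_msg : Prop := ∀ (matrix : List (List Int)), Dom_msg matrix → Spec_msg matrix (msg matrix)

-- ===== LEMMAS AND PROOFS =====

-- letter emitted for one value x (empty when out of range)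
def deltaOf (x : Int) : String :=
  if 0 ≤ x ∧ x < 26 then String.mk [Char.ofNat (x.toNat + 65)] else ""

theorem strJoin_cons (s : String) (l : List String) :
    PySem.Str.join "" (s :: l) = s ++ PySem.Str.join "" l := by
  cases l with
  | nil => simp [PySem.Str.join, PySem.Chars.join_singleton, PySem.Chars.join_nil]
  | cons t r => simp [PySem.Str.join, PySem.Chars.join_cons_cons]

theorem strJoin_append (l1 l2 : List String) :
    PySem.Str.join "" (l1 ++ l2) = PySem.Str.join "" l1 ++ PySem.Str.join "" l2 := by
  induction l1 with
  | nil => simp [PySem.Str.join, PySem.Chars.join_nil]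
  | cons s r ih => simp [strJoin_cons, ih, String.append_assoc]

-- the inner dict scan only prepends: pull the accumulator out
theorem inner_acc (pairs : List (String × Int)) (x : Int) (m : String) :
    pairs.foldl (fun message kv => if x = kv.2 then message ++ kv.1 else message) m
      = m ++ pairs.foldl (fun message kv => if x = kv.2 then message ++ kv.1 else message) "" := by
  induction pairs generalizing m with
  | nil => simp
  | cons kv rest ih =>
    simp only [List.foldl_cons]
    rw [ih, ih (if x = kv.2 then "" ++ kv.1 else "")]
    split <;> simp [String.append_assoc]

-- no pair matches ⇒ the scan is the identity
theorem inner_none (pairs : List (String × Int)) (x : Int) (m : String)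
    (h : ∀ kv ∈ pairs, x ≠ kv.2) :
    pairs.foldl (fun message kv => if x = kv.2 then message ++ kv.1 else message) m = m := by
  induction pairs generalizing m with
  | nil => rfl
  | cons kv rest ih =>
    simp only [List.foldl_cons]
    rw [if_neg (h kv (by simp))]
    exact ih m (fun kv hkv => h kv (by simp [hkv]))

-- the inner dict scan computes deltaOf
theorem inner_eq (x : Int) (m : String) :
    lettersDict.foldl (fun message kv => if x = kv.2 then message ++ kv.1 else message) m
      = m ++ deltaOf x := by
  by_cases h : 0 ≤ x ∧ x < 26
  · obtain ⟨h0, h1⟩ := h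
    rw [inner_acc]
    congr 1
    interval_cases x <;> rfl
  · rw [inner_none _ _ _ (by intro kv hkv; fin_cases hkv <;> simp <;> omega)]
    simp [deltaOf, h]

theorem vec_eq (vector : List Int) (m : String) :
    vector.foldl (fun message x =>
        lettersDict.foldl (fun message kv =>
          if x = kv.2 then message ++ kv.1 else message) message) m
      = m ++ PySem.Str.join "" (vector.filterMap (fun x =>
          if 0 ≤ x ∧ x < 26 then some (String.mk [Char.ofNat (x.toNat + 65)]) else none)) := by
  induction vector generalizing m with
  | nil => simp [PySem.Str.join, PySem.Chars.join_nil]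
  | cons x xs ih =>
    simp only [List.foldl_cons, List.filterMap_cons]
    rw [inner_eq, ih]
    by_cases h : 0 ≤ x ∧ x < 26 <;>
      simp [deltaOf, h, strJoin_cons, String.append_assoc]

theorem mat_eq (matrix : List (List Int)) (m : String) :
    matrix.foldl (fun message vector =>
        vector.foldl (fun message x =>
          lettersDict.foldl (fun message kv =>
            if x = kv.2 then message ++ kv.1 else message) message) message) m
      = m ++ PySem.Str.join "" (matrix.flatMap (fun vector =>
          vector.filterMap (fun x =>
            if 0 ≤ x ∧ x < 26 then some (String.mk [Char.ofNat (x.toNat + 65)]) else none))) := by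
  induction matrix generalizing m with
  | nil => simp [PySem.Str.join, PySem.Chars.join_nil]
  | cons v vs ih =>
    simp only [List.foldl_cons, List.flatMap_cons]
    rw [vec_eq, ih, strJoin_append, String.append_assoc]

-- ===== VERDICT (by name: the statement is the Claim_ definition above) =====
theorem msg_spec : Claim_equal_msg := by
  intro matrix _
  unfold Spec_msg msg msg_alt
  simpa using mat_eq matrix ""
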